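-- pv_equiv track=rewrite | github.com/Moon-Eyes/Computational-Quantum-Physics | Homework9_22/task1.py | generate_basis
-- ===== SOURCE A (Python) =====
-- import itertools
--
-- def generate_basis(n_sites, n_particles):
--     """Generates basis states for a given number of sites and particles."""
--     if n_particles > n_sites or n_particles < 0:
--         return []
--     basis = []
--     for pos in itertools.combinations(range(n_sites), n_particles):
--         state = 0
--         for i in pos:
--             state |= (1 << i)
--         basis.append(state)
--     return sorted(basis)
-- ===== SOURCE B (Python) =====
-- def _dp(n, k):
--     # states[j] = ascending list of j-particle states on the sites processed so
--     # far; adding site i appends, to each row, the previous row's states with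
--     # the new top bit set, keeping ascending order
--     if k == 0:
--         return [0]
--     states = [[0]] + [[] for _ in range(k)]
--     for i in range(1, n + 1):
--         top = 1 << (i - 1)
--         for j in range(k, 0, -1):
--             states[j] += [s + top for s in states[j - 1]]
--     return states[k]
--
--
-- def generate_basis(n_sites, n_particles):
--     """Generates basis states for a given number of sites and particles."""
--     if n_particles > n_sites or n_particles < 0:
--         return []
--     if 2 * n_particles > n_sites:
--         # complement symmetry: k-particle states are the bitwise complements of
--         # the (n-k)-particle states, in reversed order
--         full = (1 << n_sites) - 1
--         return [full - s for s in reversed(_dp(n_sites, n_sites - n_particles))]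
--     return _dp(n_sites, n_particles)
-- ===== Notes on version B (the rewrite author's own statement) =====
-- stated objective: alternative
-- what changed: Replaces the combinations-enumerate-then-sort construction by a dynamic programme over sites (row j = ascending j-particle states, each new site appends the previous row shifted by the new top bit), using complement symmetry when 2k > n; the output is built already sorted, with no itertools and no sort.
import Mathlib
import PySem

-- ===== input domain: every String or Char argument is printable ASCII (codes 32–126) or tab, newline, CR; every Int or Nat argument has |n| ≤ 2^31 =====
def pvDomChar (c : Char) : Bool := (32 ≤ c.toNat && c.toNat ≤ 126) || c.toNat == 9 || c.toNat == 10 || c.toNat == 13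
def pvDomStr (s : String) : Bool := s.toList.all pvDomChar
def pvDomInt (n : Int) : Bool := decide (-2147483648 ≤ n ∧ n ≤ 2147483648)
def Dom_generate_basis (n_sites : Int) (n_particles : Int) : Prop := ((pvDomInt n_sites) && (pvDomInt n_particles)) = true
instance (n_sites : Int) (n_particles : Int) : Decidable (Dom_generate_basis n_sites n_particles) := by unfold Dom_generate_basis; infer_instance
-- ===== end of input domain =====

-- B replaces A's combinations-enumeration-then-sort by a recursion on the highest site that
-- emits the basis already in ascending order (no itertools, no sort); objective: alternative algorithm.

-- ===== PORT A =====

-- itertools.combinations(l, k), in its lexicographic emission order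
def combosA (l : List Int) (k : Int) : List (List Int) :=
  if k = 0 then [[]]
  else
    match l with
    | [] => []
    | x :: xs => (combosA xs (k - 1)).map (fun c => x :: c) ++ combosA xs k

-- the inner loop: state = 0; for i in pos: state |= (1 << i)
def maskOfA (pos : List Int) : Int :=
  pos.foldl (fun state i => PySem.Int.bor state ((1 : Int) <<< (i.toNat : Int))) 0

def generate_basis (n_sites : Int) (n_particles : Int) : List Int :=
  if n_particles > n_sites ∨ n_particles < 0 then []
  else
    PySem.List.sorted
      ((combosA (PySem.List.pyRange 0 n_sites 1) n_particles).foldl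
        (fun basis pos => basis ++ [maskOfA pos]) [])
      (fun x => x) false

-- ===== PORT B =====

-- dynamic-programming step: one new site; each row j becomes
-- states[j] + [s + top for s in states[j-1]] (rows processed against their old predecessor)
def stepAux (top : Int) (prev : List Int) : List (List Int) → List (List Int)
  | [] => []
  | r :: rs => (r ++ prev.map (fun s => s + top)) :: stepAux top r rs

def stepB (top : Int) (states : List (List Int)) : List (List Int) :=
  match states with
  | [] => []
  | s0 :: rest => s0 :: stepAux top s0 rest

def dpB (n : Int) (k : Int) : List Int :=
  if k = 0 then [0]
  else
    (((PySem.List.pyRange 1 (n + 1) 1).foldl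
        (fun states i => stepB ((1 : Int) <<< ((i - 1).toNat : Int)) states)
        (([0] : List Int) :: List.replicate k.toNat ([] : List Int))).getD
      k.toNat [])

def generate_basis_alt (n_sites : Int) (n_particles : Int) : List Int :=
  if n_particles > n_sites ∨ n_particles < 0 then []
  else if 2 * n_particles > n_sites then
    -- complement symmetry: full - s over the reversed (n-k)-particle list
    ((dpB n_sites (n_sites - n_particles)).reverse).map
      (fun s => ((1 : Int) <<< (n_sites.toNat : Int)) - 1 - s)
  else dpB n_sites n_particles

-- ===== PRECONDITION & SPEC =====
def Spec_generate_basis (n_sites : Int) (n_particles : Int) (out : List Int) : Prop := out = generate_basis_alt n_sites n_particles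
instance (n_sites : Int) (n_particles : Int) (out : List Int) : Decidable (Spec_generate_basis n_sites n_particles out) := by unfold Spec_generate_basis; infer_instance

-- ===== CLAIM (what is proved, stated in full; the proofs are below) =====
def Claim_equal_generate_basis : Prop := ∀ (n_sites : Int) (n_particles : Int), Dom_generate_basis n_sites n_particles → Spec_generate_basis n_sites n_particles (generate_basis n_sites n_particles)

-- ===== LEMMAS AND PROOFS =====

def genB (n : Int) (k : Int) : List Int :=
  if k = 0 then [0]
  else if n ≤ 0 then []
  else genB (n - 1) k ++ (genB (n - 1) (k - 1)).map (fun s => s + (1 : Int) <<< (((n - 1).toNat : Nat) : Int))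
termination_by n.toNat
decreasing_by all_goals omega

theorem lor_two_pow_of_lt {a i : Nat} (h : a < 2^i) : a ||| 2^i = a + 2^i := by
  apply Nat.eq_of_testBit_eq
  intro j
  rw [Nat.testBit_lor, Nat.add_comm a]
  rcases lt_trichotomy j i with hj | hj | hj
  · rw [Nat.testBit_two_pow_add_gt hj, Nat.testBit_two_pow_of_ne (by omega), Bool.or_false]
  · subst hj
    rw [Nat.testBit_two_pow_add_eq, Nat.testBit_lt_two_pow h, Nat.testBit_two_pow_self]
    rfl
  · have h1 : a.testBit j = false := Nat.testBit_lt_two_pow (lt_of_lt_of_le h (Nat.pow_le_pow_right (by norm_num) hj.le))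
    have h2 : (2^i + a).testBit j = false := Nat.testBit_lt_two_pow (by
      have : 2^(i+1) ≤ 2^j := Nat.pow_le_pow_right (by norm_num) hj
      have : 2^i + a < 2^(i+1) := by rw [pow_succ]; omega
      omega)
    rw [h1, h2, Nat.testBit_two_pow_of_ne (by omega)]
    rfl

theorem int_bor_two_pow {s : Int} {i : Nat} (h0 : 0 ≤ s) (h : s < 2^i) :
    PySem.Int.bor s (2^i) = s + 2^i := by
  rw [PySem.Int.bor_of_nonneg h0 (by positivity)]
  have hcast : ((2:Int)^i) = ((2^i : Nat) : Int) := by push_cast; ring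
  have hlt : s.toNat < 2^i := by rw [hcast] at h; omega
  rw [hcast, Int.toNat_natCast, lor_two_pow_of_lt hlt]
  push_cast
  omega

theorem shl_pow (m : Nat) : (1:Int) <<< ((m : Nat) : Int) = 2 ^ m := by
  rw [Int.shiftLeft_eq_mul_pow]; push_cast; ring

theorem fold_mask (pos : List Int) : ∀ s : Int, pos.Pairwise (· < ·) → (∀ i ∈ pos, 0 ≤ i) →
    0 ≤ s → (∀ i ∈ pos, s < 2 ^ i.toNat) →
    pos.foldl (fun state i => PySem.Int.bor state ((1 : Int) <<< (i.toNat : Int))) s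
      = s + (pos.map (fun i => (2 : Int) ^ i.toNat)).sum := by
  induction pos with
  | nil => intro s _ _ _ _; simp
  | cons i rest ih =>
    intro s hp h0 hs hb
    have hstep : PySem.Int.bor s ((1 : Int) <<< (i.toNat : Int)) = s + 2 ^ i.toNat := by
      rw [shl_pow]
      exact int_bor_two_pow hs (hb i (by simp))
    simp only [List.foldl_cons, List.map_cons, List.sum_cons, hstep]
    rw [ih (s + 2 ^ i.toNat) (List.Pairwise.of_cons hp)
      (fun j hj => h0 j (by simp [hj]))
      (by have : (0:Int) < 2 ^ i.toNat := by positivity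
          omega)
      (fun j hj => by
        have hij : i < j := (List.pairwise_cons.mp hp).1 j hj
        have hi0 : (0:Int) ≤ i := h0 i (by simp)
        have hle : i.toNat + 1 ≤ j.toNat := by omega
        have h2 : (2:Int) ^ (i.toNat + 1) ≤ 2 ^ j.toNat := by
          apply pow_le_pow_right₀ (by norm_num) hle
        have hsi : s < 2 ^ i.toNat := hb i (by simp)
        calc s + 2 ^ i.toNat < 2 ^ i.toNat + 2 ^ i.toNat := by omega
          _ = 2 ^ (i.toNat + 1) := by ring
          _ ≤ 2 ^ j.toNat := h2)]
    ring

theorem genB_neg_aux : ∀ (m : Nat) (n k : Int), n.toNat = m → k < 0 → genB n k = [] := by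
  intro m
  induction m with
  | zero =>
    intro n k hm hk
    rw [genB.eq_def, if_neg (by omega), if_pos (by omega)]
  | succ m ih =>
    intro n k hm hk
    rw [genB.eq_def, if_neg (by omega), if_neg (by omega),
      ih (n - 1) k (by omega) hk, ih (n - 1) (k - 1) (by omega) (by omega)]
    rfl

theorem genB_neg (n k : Int) (hk : k < 0) : genB n k = [] :=
  genB_neg_aux n.toNat n k rfl hk

theorem genB_succ (m : Nat) (k : Int) (hk : k ≠ 0) :
    genB ((m : Int) + 1) k = genB m k ++ (genB m (k - 1)).map (fun s => s + 2 ^ m) := by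
  rw [genB.eq_def]
  simp only [hk, if_false]
  rw [if_neg (by omega)]
  have h1 : ((m : Int) + 1 - 1) = (m : Int) := by ring
  rw [h1]
  have h2 : (((m : Int).toNat : Nat) : Int) = (m : Int) := by omega
  rw [h2, shl_pow]

theorem combosA_sublist (l : List Int) : ∀ (k : Int) (c : List Int), c ∈ combosA l k → c.Sublist l := by
  induction l with
  | nil =>
    intro k c hc
    rw [combosA] at hc
    split_ifs at hc <;> simp_all
  | cons x xs ih =>
    intro k c hc
    rw [combosA] at hc
    split_ifs at hc with h
    · simp_all
    · simp only [List.mem_append, List.mem_map] at hc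
      rcases hc with ⟨d, hd, rfl⟩ | hc
      · exact List.Sublist.cons₂ x (ih _ d hd)
      · exact List.Sublist.cons x (ih _ c hc)

theorem combosA_shift (l : List Int) : ∀ k : Int,
    combosA (l.map (· + 1)) k = (combosA l k).map (List.map (· + 1)) := by
  induction l with
  | nil =>
    intro k
    rw [List.map_nil]
    rw [combosA]
    split_ifs <;> rfl
  | cons x xs ih =>
    intro k
    rw [List.map_cons]
    rw [combosA, combosA]
    split_ifs with h
    · rfl
    · rw [ih, ih]
      simp [List.map_map, Function.comp]

theorem maskOfA_eq_sum (pos : List Int) (hs : pos.Pairwise (· < ·)) (h0 : ∀ i ∈ pos, 0 ≤ i) :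
    maskOfA pos = (pos.map (fun i => (2 : Int) ^ i.toNat)).sum := by
  have := fold_mask pos 0 hs h0 le_rfl (fun i _ => by positivity)
  simpa [maskOfA] using this

theorem genB_succ' (m : Nat) (k : Int) :
    genB ((m : Int) + 1) k = genB m k ++ (genB m (k - 1)).map (fun s => s + 2 ^ m) := by
  by_cases hk : k = 0
  · subst hk
    have l1 : genB ((m : Int) + 1) 0 = [0] := by rw [genB.eq_def]; simp
    have l2 : genB (m : Int) 0 = [0] := by rw [genB.eq_def]; simp
    rw [l1, l2, genB_neg (m : Int) (0 - 1) (by omega)]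
    rfl
  · exact genB_succ m k hk

theorem genB_sorted_bounded (m : Nat) : ∀ k : Int,
    (genB m k).Pairwise (· < ·) ∧ ∀ x ∈ genB m k, 0 ≤ x ∧ x < 2 ^ m := by
  induction m with
  | zero =>
    intro k
    by_cases hk : k = 0
    · subst hk
      rw [genB.eq_def]
      simp
    · rw [genB.eq_def, if_neg hk, if_pos (by omega)]
      simp
  | succ m ih =>
    intro k
    by_cases hk : k = 0
    · subst hk
      have l1 : genB ((m + 1 : Nat) : Int) 0 = [0] := by rw [genB.eq_def]; simp
      rw [l1]
      refine ⟨List.pairwise_singleton _ _, ?_⟩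
      intro x hx
      simp only [List.mem_singleton] at hx
      subst hx
      exact ⟨le_rfl, by positivity⟩
    · have hcast : ((m + 1 : Nat) : Int) = (m : Int) + 1 := by push_cast; ring
      rw [hcast, genB_succ m k hk]
      obtain ⟨hp1, hb1⟩ := ih k
      obtain ⟨hp2, hb2⟩ := ih (k - 1)
      constructor
      · rw [List.pairwise_append]
        refine ⟨hp1, ?_, ?_⟩
        · rw [List.pairwise_map]
          exact hp2.imp (by intro a b hab; omega)
        · intro x hx y hy
          obtain ⟨_, hxlt⟩ := hb1 x hx
          simp only [List.mem_map] at hy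
          obtain ⟨s, hs, rfl⟩ := hy
          obtain ⟨hs0, _⟩ := hb2 s hs
          omega
      · intro x hx
        rw [List.mem_append] at hx
        have hpow : (2:Int) ^ (m + 1) = 2 ^ m + 2 ^ m := by ring
        rcases hx with hx | hx
        · obtain ⟨h1, h2⟩ := hb1 x hx
          constructor
          · exact h1
          · rw [hpow]; have : (0:Int) < 2 ^ m := by positivity
            omega
        · simp only [List.mem_map] at hx
          obtain ⟨s, hs, rfl⟩ := hx
          obtain ⟨h1, h2⟩ := hb2 s hs
          have : (0:Int) < 2 ^ m := by positivity
          rw [hpow]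
          omega

theorem genB_zero_of_ne (k : Int) (hk : k ≠ 0) : genB 0 k = [] := by
  rw [genB.eq_def, if_neg hk, if_pos le_rfl]

theorem genB_zero : genB 0 0 = [0] := by
  rw [genB.eq_def]; simp

theorem genB_double (m : Nat) : ∀ k : Int,
    (genB ((m : Int) + 1) k).Perm
      (((genB m k).map (fun s => 2 * s)) ++ ((genB m (k - 1)).map (fun s => 2 * s + 1))) := by
  induction m with
  | zero =>
    intro k
    rw [genB_succ' 0 k]
    simp only [Nat.cast_zero]
    by_cases hk : k = 0
    · subst hk
      rw [genB_zero, genB_neg 0 (0 - 1) (by omega)]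
      simp
    · rw [genB_zero_of_ne k hk]
      by_cases hk1 : k = 1
      · subst hk1
        norm_num [genB_zero]
      · rw [genB_zero_of_ne (k - 1) (by omega)]
        simp
  | succ m ih =>
    intro k
    have hcast : ((m + 1 : Nat) : Int) = (m : Int) + 1 := by push_cast; ring
    have hs := genB_succ' (m + 1) k
    rw [hcast] at hs ⊢
    rw [hs]
    have e2 := (ih (k - 1)).map (fun s => s + 2 ^ (m + 1))
    refine ((ih k).append e2).trans ?_
    rw [genB_succ' m k, genB_succ' m (k - 1)]
    simp only [List.map_append, List.map_map, List.append_assoc, Function.comp_def]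
    ring_nf
    refine List.Perm.append_left _ ?_
    rw [← List.append_assoc, ← List.append_assoc]
    exact List.perm_append_comm.append_right _

theorem combosA_zero (l : List Int) : combosA l 0 = [[]] := by
  rw [combosA.eq_def]; simp

theorem combosA_nil (k : Int) (hk : k ≠ 0) : combosA [] k = [] := by
  rw [combosA.eq_def]; simp [hk]

theorem combosA_cons (x : Int) (xs : List Int) (k : Int) (hk : k ≠ 0) :
    combosA (x :: xs) k = (combosA xs (k - 1)).map (fun c => x :: c) ++ combosA xs k := by
  rw [combosA.eq_def]; simp [hk]

theorem pyRange_succ (m : Nat) : PySem.List.pyRange 0 ((m + 1 : Nat) : Int) 1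
    = 0 :: (PySem.List.pyRange 0 ((m : Nat) : Int) 1).map (· + 1) := by
  rw [PySem.List.pyRange_one, PySem.List.pyRange_one]
  have h1 : (((m + 1 : Nat) : Int) - 0).toNat = m + 1 := by omega
  have h2 : (((m : Nat) : Int) - 0).toNat = m := by omega
  rw [h1, h2, List.range_succ_eq_map]
  simp only [List.map_cons, List.map_map, Function.comp_def]
  push_cast
  simp

theorem combo_props (m : Nat) (j : Int) (c : List Int)
    (hc : c ∈ combosA (PySem.List.pyRange 0 ((m : Nat) : Int) 1) j) :
    c.Pairwise (· < ·) ∧ ∀ i ∈ c, 0 ≤ i := by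
  have hsub := combosA_sublist _ j c hc
  constructor
  · exact (PySem.List.pairwise_lt_pyRange_one 0 ((m : Nat) : Int)).sublist hsub
  · intro i hi
    have : i ∈ PySem.List.pyRange 0 ((m : Nat) : Int) 1 := hsub.subset hi
    rw [PySem.List.mem_pyRange_one] at this
    exact this.1

theorem mask_shift (c : List Int) (hp : c.Pairwise (· < ·)) (h0 : ∀ i ∈ c, 0 ≤ i) :
    maskOfA (c.map (· + 1)) = 2 * maskOfA c := by
  have hp' : (c.map (· + 1)).Pairwise (· < ·) := by
    rw [List.pairwise_map]; exact hp.imp (by intro a b; omega)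
  have h0' : ∀ i ∈ c.map (· + 1), 0 ≤ i := by
    intro i hi; simp only [List.mem_map] at hi; obtain ⟨j, hj, rfl⟩ := hi
    have := h0 j hj; omega
  rw [maskOfA_eq_sum _ hp' h0', maskOfA_eq_sum _ hp h0]
  rw [List.map_map]
  have : ∀ i ∈ c, ((fun i => (2:Int) ^ i.toNat) ∘ (· + 1)) i = 2 * 2 ^ i.toNat := by
    intro i hi
    have := h0 i hi
    simp only [Function.comp]
    rw [show (i + 1).toNat = i.toNat + 1 by omega]
    ring
  rw [List.map_congr_left this]
  rw [List.sum_map_mul_left]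

theorem mask_cons_zero (c : List Int) (hp : c.Pairwise (· < ·)) (h0 : ∀ i ∈ c, 0 ≤ i) :
    maskOfA (0 :: c.map (· + 1)) = 2 * maskOfA c + 1 := by
  have hp2 : (c.map (· + 1)).Pairwise (· < ·) := by
    rw [List.pairwise_map]; exact hp.imp (by intro a b; omega)
  have h02 : ∀ i ∈ c.map (· + 1), 0 ≤ i := by
    intro i hi; obtain ⟨j, hj, rfl⟩ := List.mem_map.mp hi; have := h0 j hj; omega
  have hp' : (0 :: c.map (· + 1)).Pairwise (· < ·) := by
    rw [List.pairwise_cons]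
    exact ⟨fun j hj => by obtain ⟨i, hi, rfl⟩ := List.mem_map.mp hj; have := h0 i hi; omega, hp2⟩
  have h0' : ∀ i ∈ 0 :: c.map (· + 1), 0 ≤ i := by
    intro i hi
    rcases List.mem_cons.mp hi with rfl | hi
    · exact le_rfl
    · exact h02 i hi
  rw [maskOfA_eq_sum _ hp' h0', List.map_cons, List.sum_cons,
      ← maskOfA_eq_sum _ hp2 h02, mask_shift c hp h0]
  norm_num
  ring

theorem masks_perm (m : Nat) : ∀ k : Int,
    ((combosA (PySem.List.pyRange 0 ((m : Nat) : Int) 1) k).map maskOfA).Perm (genB ((m : Nat) : Int) k) := by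
  induction m with
  | zero =>
    intro k
    have hr : PySem.List.pyRange 0 ((0 : Nat) : Int) 1 = [] := by
      rw [PySem.List.pyRange_one]; simp
    rw [hr]
    by_cases hk : k = 0
    · subst hk
      rw [combosA_zero]
      simp only [Nat.cast_zero, genB_zero]
      exact List.Perm.refl _
    · rw [combosA_nil k hk]
      simp only [Nat.cast_zero, genB_zero_of_ne k hk]
      exact List.Perm.refl _
  | succ m ih =>
    intro k
    by_cases hk : k = 0
    · subst hk
      rw [combosA_zero]
      have l1 : genB ((m + 1 : Nat) : Int) 0 = [0] := by rw [genB.eq_def]; simp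
      rw [l1]
      exact List.Perm.refl _
    · rw [pyRange_succ m, combosA_cons _ _ _ hk, combosA_shift, combosA_shift]
      simp only [List.map_append, List.map_map, Function.comp_def]
      have e1 : List.map (fun c => maskOfA ((0 : Int) :: List.map (fun x => x + 1) c))
          (combosA (PySem.List.pyRange 0 ((m : Nat) : Int) 1) (k - 1))
          = List.map (fun x => 2 * x + 1)
            (List.map maskOfA (combosA (PySem.List.pyRange 0 ((m : Nat) : Int) 1) (k - 1))) := by
        rw [List.map_map]
        apply List.map_congr_left
        intro c hc
        obtain ⟨hp, h0⟩ := combo_props m (k - 1) c hc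
        simp only [Function.comp_def]
        exact mask_cons_zero c hp h0
      have e2 : List.map (fun c => maskOfA (List.map (fun x => x + 1) c))
          (combosA (PySem.List.pyRange 0 ((m : Nat) : Int) 1) k)
          = List.map (fun x => 2 * x)
            (List.map maskOfA (combosA (PySem.List.pyRange 0 ((m : Nat) : Int) 1) k)) := by
        rw [List.map_map]
        apply List.map_congr_left
        intro c hc
        obtain ⟨hp, h0⟩ := combo_props m k c hc
        simp only [Function.comp_def]
        exact mask_shift c hp h0
      rw [e1, e2]
      have hcast : ((m + 1 : Nat) : Int) = (m : Int) + 1 := by push_cast; ring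
      rw [hcast]
      refine List.Perm.trans ?_ (genB_double m k).symm
      refine List.Perm.trans (List.perm_append_comm) ?_
      exact List.Perm.append ((ih k).map _) ((ih (k - 1)).map _)


theorem genB_k0 (n : Int) : genB n 0 = [0] := by
  rw [genB.eq_def]; simp

theorem stepAux_spec (top : Int) (g g' : Nat → List Int)
    (h0 : ∀ a : Nat, g' (a + 1) = g (a + 1) ++ (g a).map (fun s => s + top)) :
    ∀ (t a : Nat), stepAux top (g a) ((List.range' (a + 1) t).map g) = (List.range' (a + 1) t).map g' := by
  intro t
  induction t with
  | zero => intro a; simp [stepAux]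
  | succ t ih =>
    intro a
    rw [List.range'_succ, List.map_cons, List.map_cons, stepAux, ← h0 a, ih (a + 1)]

theorem stepB_spec (m k : Nat) :
    stepB ((2 : Int) ^ m) ((List.range (k + 1)).map (fun (j : Nat) => genB (m : Int) (j : Int)))
      = (List.range (k + 1)).map (fun (j : Nat) => genB ((m : Int) + 1) (j : Int)) := by
  rw [List.range_eq_range', List.range'_succ, List.map_cons, List.map_cons, stepB]
  have hh : ∀ a : Nat, (fun (j : Nat) => genB ((m : Int) + 1) (j : Int)) (a + 1)
      = (fun (j : Nat) => genB ((m : Int) : Int) (j : Int)) (a + 1)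
        ++ ((fun (j : Nat) => genB ((m : Int) : Int) (j : Int)) a).map (fun s => s + (2 : Int) ^ m) := by
    intro a
    have := genB_succ' m ((a : Int) + 1)
    have hc1 : ((a + 1 : Nat) : Int) = (a : Int) + 1 := by push_cast; ring
    have hc2 : ((a : Int) + 1 - 1) = (a : Int) := by ring
    simp only [hc1, hc2] at this ⊢
    exact this
  congr 1
  · simp only [Nat.cast_zero, genB_k0]
  · have haux := stepAux_spec ((2 : Int) ^ m) (fun (j : Nat) => genB (m : Int) (j : Int))
      (fun (j : Nat) => genB ((m : Int) + 1) (j : Int)) hh k 0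
    simpa using haux

theorem tableAfter (k : Nat) : ∀ m : Nat,
    (PySem.List.pyRange 1 ((m : Int) + 1) 1).foldl
        (fun states i => stepB ((1 : Int) <<< ((i - 1).toNat : Int)) states)
        (([0] : List Int) :: List.replicate k ([] : List Int))
      = (List.range (k + 1)).map (fun (j : Nat) => genB (m : Int) (j : Int)) := by
  intro m
  induction m with
  | zero =>
    rw [PySem.List.pyRange_one_eq_nil (by omega), List.foldl_nil]
    rw [List.range_eq_range', List.range'_succ, List.map_cons]
    simp only [Nat.cast_zero, genB_k0]
    congr 1
    have hmem : ∀ b ∈ (List.range' (0 + 1) k).map (fun (j : Nat) => genB 0 (j : Int)), b = ([] : List Int) := by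
      intro b hb
      obtain ⟨j, hj, rfl⟩ := List.mem_map.mp hb
      have : 1 ≤ j := by obtain ⟨i, hi, rfl⟩ := List.mem_range'.mp hj; omega
      exact genB_zero_of_ne (j : Int) (by omega)
    rw [List.eq_replicate_of_mem hmem, List.length_map, List.length_range']
  | succ m ih =>
    have hsplit : PySem.List.pyRange 1 (((m + 1 : Nat) : Int) + 1) 1
        = PySem.List.pyRange 1 ((m : Int) + 1) 1 ++ [(m : Int) + 1] := by
      have := PySem.List.pyRange_one_succ_right (a := 1) (b := (m : Int) + 1) (by omega)
      rw [← this]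
      norm_cast
    rw [hsplit, List.foldl_append, ih, List.foldl_cons, List.foldl_nil]
    have ht : ((m : Int) + 1 - 1).toNat = m := by omega
    rw [ht, shl_pow, stepB_spec m k]
    have hc : ((m + 1 : Nat) : Int) = (m : Int) + 1 := by push_cast; ring
    rw [hc]

theorem genB_gt_aux : ∀ (m : Nat) (n k : Int), 0 ≤ n → n.toNat = m → n < k → genB n k = [] := by
  intro m
  induction m with
  | zero =>
    intro n k hn hm hk
    rw [genB.eq_def, if_neg (by omega), if_pos (by omega)]
  | succ m ih =>
    intro n k hn hm hk
    rw [genB.eq_def, if_neg (by omega), if_neg (by omega),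
      ih (n - 1) k (by omega) (by omega) (by omega), ih (n - 1) (k - 1) (by omega) (by omega) (by omega)]
    rfl

theorem genB_gt (n k : Int) (hn : 0 ≤ n) (hk : n < k) : genB n k = [] :=
  genB_gt_aux n.toNat n k hn rfl hk

theorem comp_eq (m : Nat) : ∀ k : Int, 0 ≤ k → k ≤ (m : Int) →
    ((genB (m : Int) ((m : Int) - k)).reverse).map (fun s => 2 ^ m - 1 - s) = genB (m : Int) k := by
  induction m with
  | zero =>
    intro k h0 h1
    have hk : k = 0 := by omega
    subst hk
    simp only [Nat.cast_zero, sub_zero, genB_k0]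
    rfl
  | succ m ih =>
    intro k h0 h1
    have hc : ((m + 1 : Nat) : Int) = (m : Int) + 1 := by push_cast; ring
    rw [hc]
    rw [genB_succ' m ((m : Int) + 1 - k)]
    rw [List.reverse_append, List.map_append, List.map_reverse, List.map_reverse, List.map_map]
    have hpow : (2 : Int) ^ (m + 1) = 2 ^ m + 2 ^ m := by ring
    have hf1 : ((fun s => (2 : Int) ^ (m + 1) - 1 - s) ∘ fun s => s + 2 ^ m)
        = fun s => (2 : Int) ^ m - 1 - s := by
      funext s; simp only [Function.comp]; rw [hpow]; ring
    rw [hf1, genB_succ' m k]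
    congr 1
    · rw [show (m : Int) + 1 - k - 1 = (m : Int) - k by ring]
      by_cases hkm : k = (m : Int) + 1
      · rw [hkm, show (m : Int) - ((m : Int) + 1) = -1 by ring, genB_neg _ (-1) (by omega),
          genB_gt (m : Int) ((m : Int) + 1) (by omega) (by omega)]
        rfl
      · rw [← List.map_reverse]
        exact ih k h0 (by omega)
    · by_cases hk0 : k = 0
      · rw [hk0, show (m : Int) + 1 - 0 = (m : Int) + 1 by ring,
          genB_gt (m : Int) ((m : Int) + 1) (by omega) (by omega),
          show (0 : Int) - 1 = -1 by ring, genB_neg (m : Int) (-1) (by omega)]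
        rfl
      · have i2 := ih (k - 1) (by omega) (by omega)
        rw [show (m : Int) + 1 - k = (m : Int) - (k - 1) by ring, ← i2, List.map_map,
          show ((fun s => s + (2 : Int) ^ m) ∘ (fun s => (2 : Int) ^ m - 1 - s))
            = (fun s => (2 : Int) ^ (m + 1) - 1 - s) by
              funext s; simp only [Function.comp]; rw [hpow]; ring,
          List.map_reverse]

theorem dp_eq_genB (n k : Int) (hn : 0 ≤ n) (hk : 0 ≤ k) : dpB n k = genB n k := by
  unfold dpB
  by_cases h0 : k = 0
  · subst h0
    rw [if_pos rfl, genB_k0]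
  · rw [if_neg h0]
    have hnn : n = (n.toNat : Int) := by omega
    have hkc : k = (k.toNat : Int) := by omega
    rw [hnn, tableAfter k.toNat n.toNat]
    rw [List.getD_eq_getElem?_getD, List.getElem?_map, List.getElem?_range (by omega)]
    simp only [Option.map_some, Option.getD_some]
    rw [← hkc, ← hnn]

theorem alt_eq_genB (n k : Int) (hkn : k ≤ n) (hk0 : 0 ≤ k) :
    generate_basis_alt n k = genB n k := by
  unfold generate_basis_alt
  rw [if_neg (by omega)]
  by_cases hbig : 2 * k > n
  · rw [if_pos hbig, dp_eq_genB n (n - k) (by omega) (by omega)]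
    have hn : n = (n.toNat : Int) := by omega
    have hshl : (1 : Int) <<< (n.toNat : Int) = 2 ^ n.toNat := shl_pow n.toNat
    rw [hshl]
    calc ((genB n (n - k)).reverse).map (fun s => 2 ^ n.toNat - 1 - s)
        = ((genB (n.toNat : Int) ((n.toNat : Int) - k)).reverse).map (fun s => 2 ^ n.toNat - 1 - s) := by
          rw [← hn]
      _ = genB (n.toNat : Int) k := comp_eq n.toNat k hk0 (by omega)
      _ = genB n k := by rw [← hn]
  · rw [if_neg hbig, dp_eq_genB n k (by omega) hk0]

-- ===== VERDICT (by name: the statement is the Claim_ definition above) =====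
theorem generate_basis_spec : Claim_equal_generate_basis := by
  intro n k _
  unfold Spec_generate_basis generate_basis
  split_ifs with h
  · unfold generate_basis_alt
    rw [if_pos h]
  · push Not at h
    obtain ⟨hkn, hk0⟩ := h
    have hn0 : 0 ≤ n := le_trans hk0 hkn
    have hm : n = (n.toNat : Int) := (Int.toNat_of_nonneg hn0).symm
    rw [alt_eq_genB n k hkn hk0, PySem.List.foldl_append_singleton_eq_map, List.nil_append, hm]
    exact PySem.List.sorted_eq_of_perm_of_pairwise_lt _ _ _ (masks_perm n.toNat k).symm
      (genB_sorted_bounded n.toNat k).1
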